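-- pv_equiv track=rewrite | github.com/LavX/ai-subtitle-translator | src/subtitle_translator/core/translator.py | _add_rtl_markers
-- ===== SOURCE A (Python) =====
-- def _add_rtl_markers(text: str) -> str:
--     """Add RTL markers to text for proper display."""
--     RLE = "\u202B"  # RIGHT-TO-LEFT EMBEDDING
--     PDF = "\u202C"  # POP DIRECTIONAL FORMATTING
--
--     lines = text.split("\n")
--     marked_lines = []
--
--     for line in lines:
--         if line.strip():
--             marked_lines.append(f"{RLE}{line}{PDF}")
--         else:
--             marked_lines.append(line)
--
--     return "\n".join(marked_lines)
-- ===== SOURCE B (Python) =====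
-- def _add_rtl_markers(text: str) -> str:
--     """Add RTL markers to text for proper display (single streaming pass)."""
--     RLE = "\u202B"
--     PDF = "\u202C"
--
--     out = []
--     buf = []
--     has_ink = False
--     for ch in text:
--         if ch == "\n":
--             if has_ink:
--                 out.append(RLE)
--                 out.extend(buf)
--                 out.append(PDF)
--             else:
--                 out.extend(buf)
--             out.append("\n")
--             buf = []
--             has_ink = False
--         else:
--             buf.append(ch)
--             has_ink = has_ink or not ch.isspace()
--     if has_ink:
--         out.append(RLE)
--         out.extend(buf)
--         out.append(PDF)
--     else:
--         out.extend(buf)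
--     return "".join(out)
-- ===== Notes on version B (the rewrite author's own statement) =====
-- stated objective: alternative
-- what changed: Replaces the split-into-lines / per-line strip() test / list-of-marked-lines / join pipeline with a single streaming left-to-right character scan that emits output directly, buffering the current line and tracking a has-non-whitespace flag instead of calling strip.
import Mathlib
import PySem

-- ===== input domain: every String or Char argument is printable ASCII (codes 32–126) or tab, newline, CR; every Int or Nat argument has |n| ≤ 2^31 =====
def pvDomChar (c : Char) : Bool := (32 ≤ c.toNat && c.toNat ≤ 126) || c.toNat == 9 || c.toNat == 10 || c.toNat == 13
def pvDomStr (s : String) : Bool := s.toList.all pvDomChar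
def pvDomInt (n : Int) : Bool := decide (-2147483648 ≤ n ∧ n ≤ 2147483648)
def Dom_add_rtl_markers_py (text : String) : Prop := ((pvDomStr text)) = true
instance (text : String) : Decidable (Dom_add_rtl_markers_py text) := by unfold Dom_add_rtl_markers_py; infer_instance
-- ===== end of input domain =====

-- B replaces A's split/strip/join pipeline by a single streaming character scan; objective: alternative decomposition, same O(n) cost.


-- ===== PORT A =====
-- lines = text.split("\n"); for line in lines: append wrapped or plain; "\n".join(...)
def add_rtl_markers_py (text : String) : String :=
  let lines := PySem.Chars.splitOn text.toList ['\n']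
  let marked := lines.foldl
    (fun acc line =>
      if PySem.Chars.strip line ≠ [] then
        acc ++ ['\u202B' :: line ++ ['\u202C']]
      else
        acc ++ [line]) []
  String.mk (PySem.Chars.join ['\n'] marked)

-- ===== PORT B =====
-- single pass: (out, buf, has_ink); flush buf at each '\n' and at the end
def pvFlushB (out buf : List Char) (ink : Bool) : List Char :=
  if ink then out ++ '\u202B' :: buf ++ ['\u202C'] else out ++ buf

def pvStepB (st : List Char × List Char × Bool) (c : Char) : List Char × List Char × Bool :=
  if c = '\n' then
    (pvFlushB st.1 st.2.1 st.2.2 ++ ['\n'], [], false)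
  else
    (st.1, st.2.1 ++ [c], st.2.2 || !PySem.Chars.isspace c)

def add_rtl_markers_py_alt (text : String) : String :=
  let st := text.toList.foldl pvStepB ([], [], false)
  String.mk (pvFlushB st.1 st.2.1 st.2.2)

-- ===== PRECONDITION & SPEC =====
def Spec_add_rtl_markers_py (text : String) (out : String) : Prop := out = add_rtl_markers_py_alt text
instance (text : String) (out : String) : Decidable (Spec_add_rtl_markers_py text out) := by unfold Spec_add_rtl_markers_py; infer_instance

-- ===== CLAIM (what is proved, stated in full; the proofs are below) =====
def Claim_equal_add_rtl_markers_py : Prop := ∀ (text : String), Dom_add_rtl_markers_py text → Spec_add_rtl_markers_py text (add_rtl_markers_py text)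

-- ===== LEMMAS AND PROOFS =====

-- structural characterisation of split on '\n'
def pvSplitNL : List Char → List (List Char)
  | [] => [[]]
  | c :: cs => if c = '\n' then [] :: pvSplitNL cs else (pvSplitNL cs).modifyHead (c :: ·)

lemma pvSplitNL_ne_nil (cs : List Char) : pvSplitNL cs ≠ [] := by
  cases cs with
  | nil => simp [pvSplitNL]
  | cons c cs =>
    simp only [pvSplitNL]
    split_ifs
    · simp
    · cases h : pvSplitNL cs with
      | nil => exact absurd h (pvSplitNL_ne_nil cs)
      | cons a t => simp

lemma pvGo_nl (l : List Char) : ∀ (fuel : Nat) (cur : List Char) (acc : List (List Char)),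
    l.length ≤ fuel →
    PySem.Chars.splitOn.go ['\n'] fuel l cur acc
      = acc.reverse ++ (pvSplitNL l).modifyHead (cur.reverse ++ ·) := by
  induction l with
  | nil =>
    intro fuel cur acc _
    cases fuel <;> simp [PySem.Chars.splitOn.go, pvSplitNL]
  | cons c rest ih =>
    intro fuel cur acc hf
    cases fuel with
    | zero => simp at hf
    | succ f =>
      by_cases hc : c = '\n'
      · subst hc
        have : PySem.Chars.splitOn.go ['\n'] (f+1) ('\n' :: rest) cur acc
            = PySem.Chars.splitOn.go ['\n'] f rest [] (cur.reverse :: acc) := by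
          simp [PySem.Chars.splitOn.go, List.isPrefixOf]
        rw [this, ih f [] (cur.reverse :: acc) (by simpa using hf)]
        cases h : pvSplitNL rest <;> simp [pvSplitNL, h]
      · have : PySem.Chars.splitOn.go ['\n'] (f+1) (c :: rest) cur acc
            = PySem.Chars.splitOn.go ['\n'] f rest (c :: cur) acc := by
          simp only [PySem.Chars.splitOn.go, List.isPrefixOf, Bool.and_eq_true, beq_iff_eq]
          rw [if_neg]
          rintro ⟨h, -⟩
          exact hc h.symm
        rw [this, ih f (c :: cur) acc (by simpa using Nat.le_of_succ_le_succ hf)]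
        simp only [pvSplitNL, if_neg hc, List.modifyHead_modifyHead, List.reverse_cons,
          List.append_assoc, List.singleton_append]
        rfl

lemma pvSplitOn_eq (cs : List Char) : PySem.Chars.splitOn cs ['\n'] = pvSplitNL cs := by
  unfold PySem.Chars.splitOn
  rw [pvGo_nl cs (cs.length + 1) [] [] (Nat.le_succ _)]
  cases h : pvSplitNL cs with
  | nil => exact absurd h (pvSplitNL_ne_nil cs)
  | cons a t => simp

-- strip l is empty iff l is all whitespace
lemma pvStrip_eq_nil_iff (l : List Char) :
    PySem.Chars.strip l = [] ↔ ∀ c ∈ l, PySem.Chars.isspace c = true := by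
  unfold PySem.Chars.strip PySem.Chars.rstrip PySem.Chars.lstrip
  simp only [List.reverse_eq_nil_iff, List.dropWhile_eq_nil_iff, List.mem_reverse]
  constructor
  · intro h c hc
    rw [← List.takeWhile_append_dropWhile (p := PySem.Chars.isspace) (l := l)] at hc
    rcases List.mem_append.mp hc with h1 | h2
    · exact List.mem_takeWhile_imp h1
    · exact h c h2
  · intro h c hc
    exact h c ((List.dropWhile_sublist _).subset hc)

lemma pvModifyNil (l : List (List Char)) :
    List.modifyHead (fun x => ([] : List Char) ++ x) l = l := by
  cases l <;> simp

def pvWrapA (line : List Char) : List Char :=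
  if PySem.Chars.strip line ≠ [] then '\u202B' :: line ++ ['\u202C'] else line

def pvRender (buf : List Char) (cs : List Char) : List Char :=
  PySem.Chars.join ['\n'] (((pvSplitNL cs).modifyHead (buf ++ ·)).map pvWrapA)

lemma pvJoin_cons (x : List Char) (ys : List (List Char)) (h : ys ≠ []) :
    PySem.Chars.join ['\n'] (x :: ys) = x ++ '\n' :: PySem.Chars.join ['\n'] ys := by
  cases ys with
  | nil => exact absurd rfl h
  | cons a t => rw [PySem.Chars.join_cons_cons]; simp

lemma pvInk_iff (buf : List Char) :
    buf.any (fun c => !PySem.Chars.isspace c) = decide (PySem.Chars.strip buf ≠ []) := by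
  have h : buf.any (fun c => !PySem.Chars.isspace c) = true ↔ PySem.Chars.strip buf ≠ [] := by
    simp [List.any_eq_true, pvStrip_eq_nil_iff]
  cases hb : buf.any (fun c => !PySem.Chars.isspace c) with
  | true => exact (decide_eq_true (h.mp hb)).symm
  | false =>
    have : ¬ PySem.Chars.strip buf ≠ [] := fun hn => by simp [h.mpr hn] at hb
    simp [this]

lemma pvFlush_eq_wrap (out buf : List Char) :
    pvFlushB out buf (buf.any (fun c => !PySem.Chars.isspace c)) = out ++ pvWrapA buf := by
  rw [pvInk_iff]
  unfold pvFlushB pvWrapA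
  by_cases h : PySem.Chars.strip buf ≠ [] <;> simp [h]

lemma pvLoopB (cs : List Char) : ∀ (out buf : List Char),
    pvFlushB (cs.foldl pvStepB (out, buf, buf.any (fun c => !PySem.Chars.isspace c))).1
        (cs.foldl pvStepB (out, buf, buf.any (fun c => !PySem.Chars.isspace c))).2.1
        (cs.foldl pvStepB (out, buf, buf.any (fun c => !PySem.Chars.isspace c))).2.2
      = out ++ pvRender buf cs := by
  induction cs with
  | nil =>
    intro out buf
    simp only [List.foldl_nil, pvRender, pvSplitNL, List.modifyHead_cons, List.map_cons,
      List.map_nil, PySem.Chars.join_singleton, List.append_nil]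
    exact pvFlush_eq_wrap out buf
  | cons c cs ih =>
    intro out buf
    by_cases hc : c = '\n'
    · subst hc
      rw [List.foldl_cons]
      have hstep : pvStepB (out, buf, buf.any (fun c => !PySem.Chars.isspace c)) '\n'
          = (pvFlushB out buf (buf.any (fun c => !PySem.Chars.isspace c)) ++ ['\n'], [], false) := by
        simp [pvStepB]
      rw [hstep]
      have h0 : (false : Bool) = ([] : List Char).any (fun c => !PySem.Chars.isspace c) := rfl
      rw [h0, ih]
      rw [pvFlush_eq_wrap]
      have hrend : pvRender buf ('\n' :: cs)
          = pvWrapA buf ++ '\n' :: pvRender [] cs := by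
        unfold pvRender
        simp only [pvSplitNL, ite_true, List.modifyHead_cons, List.map_cons]
        rw [pvJoin_cons _ _ (by simp [pvSplitNL_ne_nil cs])]
        rw [pvModifyNil]
        simp
      rw [hrend]
      simp
    · rw [List.foldl_cons]
      have hstep : pvStepB (out, buf, buf.any (fun c => !PySem.Chars.isspace c)) c
          = (out, buf ++ [c], (buf ++ [c]).any (fun c => !PySem.Chars.isspace c)) := by
        simp [pvStepB, hc, List.any_append]
      rw [hstep, ih]
      congr 1
      unfold pvRender
      simp only [pvSplitNL, if_neg hc, List.modifyHead_modifyHead]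
      congr 2
      cases h : pvSplitNL cs with
      | nil => exact absurd h (pvSplitNL_ne_nil cs)
      | cons a t => simp

theorem add_rtl_markers_py_spec : Claim_equal_add_rtl_markers_py := by
  intro text _
  unfold Spec_add_rtl_markers_py add_rtl_markers_py add_rtl_markers_py_alt
  have hfold : ∀ (lines : List (List Char)),
      lines.foldl
        (fun acc line =>
          if PySem.Chars.strip line ≠ [] then
            acc ++ ['\u202B' :: line ++ ['\u202C']]
          else
            acc ++ [line]) []
        = lines.map pvWrapA := by
    intro lines
    have hfun : (fun (acc : List (List Char)) line =>
        if PySem.Chars.strip line ≠ [] then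
          acc ++ ['\u202B' :: line ++ ['\u202C']]
        else
          acc ++ [line])
        = fun acc line => acc ++ [pvWrapA line] := by
      funext acc line
      unfold pvWrapA
      split_ifs <;> rfl
    rw [hfun, PySem.List.foldl_append_singleton_eq_map]
    simp
  simp only [hfold, pvSplitOn_eq]
  have h0 : (false : Bool) = ([] : List Char).any (fun c => !PySem.Chars.isspace c) := rfl
  rw [h0, pvLoopB]
  unfold pvRender
  rw [pvModifyNil]
  simp
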